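-- pv_equiv track=rewrite | github.com/Lumif-ai/flywheel-v2 | skills/_shared/validate_skills.py | _is_inside_code_block
-- ===== SOURCE A (Python) =====
-- def _is_inside_code_block(body, ref):
--     """Check if a .py reference appears only inside fenced code blocks (``` ... ```)."""
--     in_block = False
--     found_outside = False
--     for line in body.split("\n"):
--         stripped = line.strip()
--         if stripped.startswith("```"):
--             in_block = not in_block
--             continue
--         if ref in line:
--             if not in_block:
--                 found_outside = True
--                 break
--     return not found_outside
-- ===== SOURCE B (Python) =====
-- def _is_inside_code_block(body, ref):
--     """Check if a .py reference appears only inside fenced code blocks (``` ... ```)."""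
--     # Group lines into segments separated by fence lines; segments at even
--     # positions are outside fenced blocks, so search only those.
--     segments = []
--     current = []
--     for line in body.split("\n"):
--         if line.strip().startswith("```"):
--             segments.append(current)
--             current = []
--         else:
--             current.append(line)
--     segments.append(current)
--     return not any(ref in line for seg in segments[0::2] for line in seg)
-- ===== Notes on version B (the rewrite author's own statement) =====
-- stated objective: alternative
-- what changed: B has no in_block toggle: it groups the lines into segments delimited by fence lines and then searches for ref only in the even-indexed segments (segments[0::2]), which are exactly the text outside fenced blocks.
import Mathlib
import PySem

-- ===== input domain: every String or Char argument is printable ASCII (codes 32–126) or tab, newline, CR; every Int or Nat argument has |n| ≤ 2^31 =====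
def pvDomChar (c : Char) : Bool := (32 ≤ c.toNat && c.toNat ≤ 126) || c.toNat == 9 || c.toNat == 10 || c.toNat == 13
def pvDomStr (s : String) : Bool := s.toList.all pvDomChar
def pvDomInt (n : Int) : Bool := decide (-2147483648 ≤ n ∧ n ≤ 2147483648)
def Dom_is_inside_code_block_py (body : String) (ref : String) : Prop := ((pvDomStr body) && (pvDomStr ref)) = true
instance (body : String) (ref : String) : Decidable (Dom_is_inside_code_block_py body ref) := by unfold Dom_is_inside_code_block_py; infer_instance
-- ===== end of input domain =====

-- B drops A's in_block toggle entirely: it groups the lines into segments delimited by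
-- fence lines and searches only the even-indexed segments (the text outside blocks).

-- ===== PORT A =====
-- loop state: in_block; returns the final value of found_outside (break = return true)
def pvALoop (ref : String) : List String → Bool → Bool
  | [], _ => false
  | line :: rest, in_block =>
    let stripped := PySem.Str.strip line
    if PySem.Str.startswith stripped "```" then
      pvALoop ref rest (!in_block)
    else if PySem.Str.isIn ref line then
      if !in_block then true
      else pvALoop ref rest in_block
    else pvALoop ref rest in_block

def is_inside_code_block_py (body : String) (ref : String) : Bool :=
  !(pvALoop ref (((PySem.Str.split? body "\n").getD [])) false)

-- ===== PORT B =====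
-- the for-loop of B: split the lines into segments at fence lines
-- (state: `current`, the segment being built; the trailing `segments.append(current)`
-- is the nil case)
def pvSegs : List String → List String → List (List String)
  | [], current => [current]
  | line :: rest, current =>
    if PySem.Str.startswith (PySem.Str.strip line) "```" then
      current :: pvSegs rest []
    else
      pvSegs rest (current ++ [line])

-- hand port of Python's stride slice segments[0::2] (every second element); exact
def pvEvens {α : Type} : List α → List α
  | [] => []
  | [x] => [x]
  | x :: _ :: rest => x :: pvEvens rest

def is_inside_code_block_py_alt (body : String) (ref : String) : Bool :=
  !((pvEvens (pvSegs (((PySem.Str.split? body "\n").getD [])) [])).any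
      (fun seg => seg.any (fun line => PySem.Str.isIn ref line)))

-- ===== PRECONDITION & SPEC =====
def Spec_is_inside_code_block_py (body : String) (ref : String) (out : Bool) : Prop := out = is_inside_code_block_py_alt body ref
instance (body : String) (ref : String) (out : Bool) : Decidable (Spec_is_inside_code_block_py body ref out) := by unfold Spec_is_inside_code_block_py; infer_instance

-- ===== CLAIM =====
def Claim_equal_is_inside_code_block_py : Prop := ∀ (body : String) (ref : String), Dom_is_inside_code_block_py body ref → Spec_is_inside_code_block_py body ref (is_inside_code_block_py body ref)

-- ===== LEMMAS AND PROOFS =====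
-- proof-only helper: "ref occurs in a segment at even position" with parity flag ib
def pvPAny (ref : String) : Bool → List (List String) → Bool
  | _, [] => false
  | ib, seg :: rest =>
    ((!ib) && seg.any (fun l => PySem.Str.isIn ref l)) || pvPAny ref (!ib) rest

lemma pvPAny_segs (ref : String) (lines : List String) :
    ∀ (cur : List String) (ib : Bool),
      pvPAny ref ib (pvSegs lines cur)
        = (((!ib) && cur.any (fun l => PySem.Str.isIn ref l)) || pvALoop ref lines ib) := by
  induction lines with
  | nil => intro cur ib; simp [pvSegs, pvPAny, pvALoop]
  | cons line rest ih =>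
    intro cur ib
    simp only [pvSegs, pvALoop]
    split_ifs with h1 h2 h3
    · simp [pvPAny, ih [] (!ib)]
    · cases ib <;> simp_all [ih (cur ++ [line])]
    · cases ib <;> simp_all [ih (cur ++ [line])]
    · cases ib <;> simp_all [ih (cur ++ [line])]

lemma pvPAny_false_eq_evens (ref : String) :
    ∀ (segs : List (List String)),
      pvPAny ref false segs
        = (pvEvens segs).any (fun seg => seg.any (fun l => PySem.Str.isIn ref l)) := by
  intro segs
  induction segs using pvEvens.induct with
  | case1 => simp [pvPAny, pvEvens]
  | case2 x => simp [pvPAny, pvEvens]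
  | case3 x y rest ih => simp [pvPAny, pvEvens, ih]

-- ===== VERDICT =====
theorem is_inside_code_block_py_spec : Claim_equal_is_inside_code_block_py := by
  intro body ref _
  unfold Spec_is_inside_code_block_py is_inside_code_block_py is_inside_code_block_py_alt
  rw [← pvPAny_false_eq_evens, pvPAny_segs]
  simp
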